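-- pv_equiv track=rewrite | github.com/rmoskwa/githubSignatureParser | src/comprehensive_parser.py | _extract_classdef_help
-- ===== SOURCE A (Python) =====
-- def _extract_classdef_help(content: str) -> str:
--     """Extract help text from classdef file."""
--     lines = content.split('\n')
--     help_lines = []
--
--     # Look for comments immediately after classdef line
--     in_help = False
--     for i, line in enumerate(lines):
--         if i == 0:
--             continue
--         if line.strip().startswith('%'):
--             in_help = True
--             help_lines.append(line.strip()[1:].strip())
--         elif in_help and not line.strip().startswith('%'):
--             break
--
--     return '\n'.join(help_lines)
-- ===== SOURCE B (Python) =====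
-- def _extract_classdef_help(content: str) -> str:
--     """Extract help text from classdef file (flag table + index/slice, no scanning loop)."""
--     lines = content.split('\n')[1:]
--     flags = [line.strip().startswith('%') for line in lines]
--     if True not in flags:
--         return ''
--     start = flags.index(True)
--     try:
--         end = flags.index(False, start)
--     except ValueError:
--         end = len(lines)
--     return '\n'.join(line.strip()[1:].strip() for line in lines[start:end])
-- ===== Notes on version B (the rewrite author's own statement) =====
-- stated objective: alternative
-- what changed: Replaces A's flag-driven loop over enumerate(lines) with a data-driven formulation: precompute a boolean flag table of which lines are '%'-comments, locate the block boundaries with list.index, and map the transform over a single slice lines[start:end].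
import Mathlib
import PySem

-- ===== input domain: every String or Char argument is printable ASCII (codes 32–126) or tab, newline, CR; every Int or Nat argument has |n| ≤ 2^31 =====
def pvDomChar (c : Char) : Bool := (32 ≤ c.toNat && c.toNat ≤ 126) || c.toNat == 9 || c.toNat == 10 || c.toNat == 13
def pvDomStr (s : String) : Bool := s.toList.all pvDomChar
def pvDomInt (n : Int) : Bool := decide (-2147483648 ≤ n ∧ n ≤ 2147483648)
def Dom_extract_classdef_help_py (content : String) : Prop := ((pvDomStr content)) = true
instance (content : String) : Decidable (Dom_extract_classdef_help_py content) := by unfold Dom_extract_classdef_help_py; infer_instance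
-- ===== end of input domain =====

-- B replaces A's flag-driven scanning loop by a flag table + index/slice formulation
-- (locate the comment block's boundaries with list.index, then map over one slice); objective: alternative.

-- ===== PORT A =====
-- line.strip().startswith('%')
def pvIsCmt (line : String) : Bool := PySem.Str.startswith (PySem.Str.strip line) "%"
-- line.strip()[1:].strip()
def pvXform (line : String) : String :=
  PySem.Str.strip (PySem.Str.slice (PySem.Str.strip line) (some 1) none)

-- the 'for i, line in enumerate(lines)' loop with state (in_help, help_lines); break returns acc
def pvALoop : List (Int × String) → Bool → List String → List String
  | [], _, acc => acc
  | (i, line) :: rest, inHelp, acc =>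
    if i == 0 then pvALoop rest inHelp acc
    else if pvIsCmt line then pvALoop rest true (acc ++ [pvXform line])
    else if inHelp then acc
    else pvALoop rest inHelp acc

-- content.split('\n'); sep "\n" is nonempty so split? is always some (exact)
def extract_classdef_help_py (content : String) : String :=
  let lines := (PySem.Str.split? content "\n").getD []
  PySem.Str.join "\n" (pvALoop (PySem.List.enumerate lines 0) false [])

-- ===== PORT B =====
-- 'end = flags.index(False, start)' (search from position start, absolute result) is ported as
-- index? on the dropped suffix shifted back by start — exact since 0 ≤ start ≤ len(flags).
def extract_classdef_help_py_alt (content : String) : String :=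
  let lines := ((PySem.Str.split? content "\n").getD []).drop 1
  let flags := lines.map pvIsCmt
  if flags.contains true then
    let start := (PySem.List.index? flags true).getD 0
    let stop : Nat := match PySem.List.index? (flags.drop start) false with
      | some j => start + j
      | none => lines.length
    PySem.Str.join "\n"
      ((PySem.List.slice lines (some (start : Int)) (some (stop : Int))).map pvXform)
  else ""

-- ===== PRECONDITION & SPEC =====
def Spec_extract_classdef_help_py (content : String) (out : String) : Prop := out = extract_classdef_help_py_alt content
instance (content : String) (out : String) : Decidable (Spec_extract_classdef_help_py content out) := by unfold Spec_extract_classdef_help_py; infer_instance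

-- ===== CLAIM (what is proved, stated in full; the proofs are below) =====
def Claim_equal_extract_classdef_help_py : Prop := ∀ (content : String), Dom_extract_classdef_help_py content → Spec_extract_classdef_help_py content (extract_classdef_help_py content)

-- ===== LEMMAS AND PROOFS =====

-- proof-only intermediate forms: suffix from the first comment line, and that comment run mapped
def pvBSkip : List String → List String
  | [] => []
  | line :: rest => if pvIsCmt line then line :: rest else pvBSkip rest

def pvBTake : List String → List String
  | [] => []
  | line :: rest => if pvIsCmt line then pvXform line :: pvBTake rest else []

-- once in_help is true, A collects exactly the consecutive comment run (pvBTake)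
theorem pvALoop_true (ls : List String) (k : Int) (hk : k ≠ 0) (acc : List String)
    (hpos : ∀ j, (0:Int) ≤ j → k + j ≠ 0) :
    pvALoop (PySem.List.enumerate ls k) true acc = acc ++ pvBTake ls := by
  induction ls generalizing k acc with
  | nil => simp [PySem.List.enumerate_nil, pvALoop, pvBTake]
  | cons l rest ih =>
    rw [PySem.List.enumerate_cons]
    unfold pvALoop
    have hk' : (k == 0) = false := by simpa using hk
    rw [hk']
    by_cases h : pvIsCmt l
    · simp only [h, if_true, Bool.false_eq_true, if_false]
      rw [ih (k + 1) (hpos 1 (by norm_num)) _ (fun j hj => by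
        have := hpos (1 + j) (by omega); omega)]
      simp [pvBTake, h]
    · simp [pvBTake, h]

-- before in_help, A skips non-comment lines; pvBSkip finds the same start
theorem pvALoop_false (ls : List String) (k : Int) (hk : k ≠ 0) (acc : List String)
    (hpos : ∀ j, (0:Int) ≤ j → k + j ≠ 0) :
    pvALoop (PySem.List.enumerate ls k) false acc = acc ++ pvBTake (pvBSkip ls) := by
  induction ls generalizing k acc with
  | nil => simp [PySem.List.enumerate_nil, pvALoop, pvBSkip, pvBTake]
  | cons l rest ih =>
    rw [PySem.List.enumerate_cons]
    unfold pvALoop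
    have hk' : (k == 0) = false := by simpa using hk
    rw [hk']
    by_cases h : pvIsCmt l
    · simp only [h, if_true, Bool.false_eq_true, if_false]
      rw [pvALoop_true rest (k + 1) (hpos 1 (by norm_num)) _ (fun j hj => by
        have := hpos (1 + j) (by omega); omega)]
      simp [pvBSkip, pvBTake, h]
    · simp only [h, Bool.false_eq_true, if_false]
      rw [ih (k + 1) (hpos 1 (by norm_num)) _ (fun j hj => by
        have := hpos (1 + j) (by omega); omega)]
      simp [pvBSkip, h]

theorem pvACore (lines : List String) :
    pvALoop (PySem.List.enumerate lines 0) false [] = pvBTake (pvBSkip (lines.drop 1)) := by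
  cases lines with
  | nil => simp [PySem.List.enumerate_nil, pvALoop, pvBSkip, pvBTake]
  | cons l rest =>
    rw [PySem.List.enumerate_cons]
    unfold pvALoop
    simp only [beq_self_eq_true, if_true, zero_add]
    rw [pvALoop_false rest 1 one_ne_zero [] (fun j hj => by omega)]
    simp

-- B's core, at the list level (the body of the port's if, with '' replaced by [])
def pvBList (ls : List String) : List String :=
  let flags := ls.map pvIsCmt
  if flags.contains true then
    let start := (PySem.List.index? flags true).getD 0
    let stop : Nat := match PySem.List.index? (flags.drop start) false with
      | some j => start + j
      | none => ls.length
    (PySem.List.slice ls (some (start : Int)) (some (stop : Int))).map pvXform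
  else []

-- the stop boundary as a function: index of the first non-comment line (or length)
def pvStopIdx (ls : List String) : Nat :=
  match PySem.List.index? (ls.map pvIsCmt) false with
  | some j => j
  | none => ls.length

theorem pvStopIdx_cons_true (l : String) (rest : List String) (h : pvIsCmt l = true) :
    pvStopIdx (l :: rest) = pvStopIdx rest + 1 := by
  unfold pvStopIdx
  rw [List.map_cons, h, PySem.List.index?_cons_of_ne _ (by decide)]
  cases hidx : PySem.List.index? (rest.map pvIsCmt) false <;> simp [hidx]

theorem pvStopIdx_cons_false (l : String) (rest : List String) (h : pvIsCmt l = false) :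
    pvStopIdx (l :: rest) = 0 := by
  unfold pvStopIdx
  rw [List.map_cons, h, PySem.List.index?_cons_self]

-- taking up to the first non-comment line and transforming is exactly pvBTake
theorem pvStop (ls : List String) :
    (ls.take (pvStopIdx ls)).map pvXform = pvBTake ls := by
  induction ls with
  | nil => simp [pvStopIdx, pvBTake]
  | cons l rest ih =>
    by_cases h : pvIsCmt l
    · rw [pvStopIdx_cons_true l rest h]
      simp [pvBTake, h, ih]
    · rw [pvStopIdx_cons_false l rest (by simpa using h)]
      simp [pvBTake, h]

-- B's index/slice core computes the comment run after the skipped prefix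
theorem pvBList_eq (ls : List String) : pvBList ls = pvBTake (pvBSkip ls) := by
  induction ls with
  | nil => simp [pvBList, pvBSkip, pvBTake]
  | cons l rest ih =>
    by_cases h : pvIsCmt l
    · -- start = 0: the slice is a take up to pvStopIdx
      unfold pvBList
      simp only [List.map_cons, h, List.contains_cons, beq_self_eq_true, Bool.true_or, if_true]
      rw [PySem.List.index?_cons_self]
      simp only [Option.getD_some, List.drop_zero]
      have hstop : (match PySem.List.index? (true :: rest.map pvIsCmt) false with
          | some j => 0 + j
          | none => (l :: rest).length) = pvStopIdx (l :: rest) := by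
        unfold pvStopIdx
        rw [List.map_cons, h]
        cases hidx : PySem.List.index? (true :: rest.map pvIsCmt) false <;> simp [hidx]
      rw [hstop, show ((0:Nat) : Int) = ((0:Nat) : Int) from rfl, PySem.List.slice_natCast]
      simp only [Nat.sub_zero, List.drop_zero]
      rw [pvStop (l :: rest)]
      simp [pvBSkip, h]
    · have hf : pvIsCmt l = false := by simpa using h
      have hskip : pvBSkip (l :: rest) = pvBSkip rest := by simp [pvBSkip, hf]
      rw [hskip]
      simp only [pvBList, List.map_cons, hf] at ih ⊢
      by_cases hc : (rest.map pvIsCmt).contains true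
      · -- the first comment line is in rest at position s; both slices coincide
        obtain ⟨s, hs⟩ : ∃ s, PySem.List.index? (rest.map pvIsCmt) true = some s :=
          Option.isSome_iff_exists.mp
            ((PySem.List.index?_isSome_iff _ _).mpr (by simpa using hc))
        rw [if_pos (show ((false :: rest.map pvIsCmt).contains true) = true by simpa using hc)]
        rw [if_pos hc] at ih
        rw [PySem.List.index?_cons_of_ne _ (show false ≠ true by decide), hs]
        rw [hs] at ih
        simp only [Option.map_some, Option.getD_some, List.drop_succ_cons,
          List.length_cons] at ih ⊢
        cases hidx : PySem.List.index? ((rest.map pvIsCmt).drop s) false with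
        | none =>
            simp only [hidx] at ih ⊢
            rw [PySem.List.slice_natCast] at ih ⊢
            rw [List.drop_succ_cons,
              show rest.length + 1 - (s + 1) = rest.length - s from by omega]
            exact ih
        | some j =>
            simp only [hidx] at ih ⊢
            rw [PySem.List.slice_natCast] at ih ⊢
            rw [List.drop_succ_cons, show s + 1 + j - (s + 1) = s + j - s from by omega]
            exact ih
      · -- no comment line at all: both sides empty
        rw [if_neg (show ¬ ((false :: rest.map pvIsCmt).contains true = true) by simpa using hc)]
        rw [if_neg hc] at ih
        exact ih

-- the alt port is join of pvBList
theorem pvAltEq (content : String) :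
    extract_classdef_help_py_alt content
      = PySem.Str.join "\n" (pvBList (((PySem.Str.split? content "\n").getD []).drop 1)) := by
  unfold extract_classdef_help_py_alt pvBList
  by_cases hc : ((((PySem.Str.split? content "\n").getD []).drop 1).map pvIsCmt).contains true <;>
    simp only [hc, if_true, if_false, Bool.false_eq_true]
  rfl

-- ===== VERDICT (by name: the statement is the Claim_ definition above) =====
theorem extract_classdef_help_py_spec : Claim_equal_extract_classdef_help_py := by
  intro content _
  show extract_classdef_help_py content = extract_classdef_help_py_alt content
  rw [pvAltEq, pvBList_eq]
  exact congrArg (PySem.Str.join "\n") (pvACore ((PySem.Str.split? content "\n").getD []))
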